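-- pv_equiv track=rewrite | github.com/samacqua/LARC | check_answers.py | bar_boundaries
-- ===== SOURCE A (Python) =====
-- def bar_boundaries(matrix, colors):
--     boundaries = {}
--     for color in colors:
--         top, bottom, left, right = len(matrix), 0, len(matrix[0]), 0
--         for i, row in enumerate(matrix):
--             for j, cell in enumerate(row):
--                 if cell == color:
--                     top = min(top, i)
--                     bottom = max(bottom, i)
--                     left = min(left, j)
--                     right = max(right, j)
--         boundaries[color] = (top, bottom, left, right)
--     return boundaries
-- ===== SOURCE B (Python) =====
-- def bar_boundaries(matrix, colors):
--     boundaries = {}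
--     if not colors:
--         return boundaries
--     default = (len(matrix), 0, len(matrix[0]), 0)
--     for color in colors:
--         boundaries[color] = default
--     wanted = set(colors)
--     for i, row in enumerate(matrix):
--         for j, cell in enumerate(row):
--             if cell in wanted:
--                 top, bottom, left, right = boundaries[cell]
--                 boundaries[cell] = (min(top, i), max(bottom, i),
--                                     min(left, j), max(right, j))
--     return boundaries
-- ===== Notes on version B (the rewrite author's own statement) =====
-- stated objective: faster
-- what changed: Instead of rescanning the whole matrix once per color, B initialises every color's box to the defaults and makes a single pass over the matrix, updating the touched color's box via a set lookup.
import Mathlib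
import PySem

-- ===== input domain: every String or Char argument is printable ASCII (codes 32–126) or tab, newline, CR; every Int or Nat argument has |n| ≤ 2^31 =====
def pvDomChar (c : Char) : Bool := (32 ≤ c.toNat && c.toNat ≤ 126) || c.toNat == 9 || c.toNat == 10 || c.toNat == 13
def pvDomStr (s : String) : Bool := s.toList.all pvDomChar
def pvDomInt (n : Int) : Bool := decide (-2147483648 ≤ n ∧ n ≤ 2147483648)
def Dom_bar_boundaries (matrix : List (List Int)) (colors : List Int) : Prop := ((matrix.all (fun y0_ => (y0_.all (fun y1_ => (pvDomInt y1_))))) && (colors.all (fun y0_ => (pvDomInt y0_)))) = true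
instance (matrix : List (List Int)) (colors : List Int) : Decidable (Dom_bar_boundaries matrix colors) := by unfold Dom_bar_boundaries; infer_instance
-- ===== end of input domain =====

-- B replaces A's per-color rescan of the matrix by one pass over the matrix with a
-- per-color box updated through a set lookup (objective: faster, asymptotic).


-- ===== PORT A =====
-- A's inner double loop for one color: top/bottom/left/right scan of the whole matrix.
def pvScanColor (matrix : List (List Int)) (color : Int) : Int × Int × Int × Int :=
  (PySem.List.enumerate matrix 0).foldl (fun s p =>
    (PySem.List.enumerate p.2 0).foldl (fun s2 q =>
      if q.2 == color then
        (min s2.1 p.1, max s2.2.1 p.1, min s2.2.2.1 q.1, max s2.2.2.2 q.1)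
      else s2) s)
    ((matrix.length : Int), 0, (((PySem.List.pyGet? matrix 0).getD []).length : Int), 0)

def bar_boundaries (matrix : List (List Int)) (colors : List Int) : List (Int × List Int) :=
  (colors.foldl (fun d color => d.insert color (pvScanColor matrix color))
    (PySem.Dict.empty : PySem.Dict Int (Int × Int × Int × Int))).items.map
    (fun p => (p.1, [p.2.1, p.2.2.1, p.2.2.2.1, p.2.2.2.2]))

-- ===== PORT B =====
def bar_boundaries_alt (matrix : List (List Int)) (colors : List Int) : List (Int × List Int) :=
  if colors.isEmpty then [] else
  let dflt : Int × Int × Int × Int :=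
    ((matrix.length : Int), 0, (((PySem.List.pyGet? matrix 0).getD []).length : Int), 0)
  let d0 := colors.foldl (fun d color => d.insert color dflt)
    (PySem.Dict.empty : PySem.Dict Int (Int × Int × Int × Int))
  let wanted : PySem.Set Int := PySem.Set.ofList colors
  let dfin := (PySem.List.enumerate matrix 0).foldl (fun d p =>
    (PySem.List.enumerate p.2 0).foldl (fun d q =>
      if PySem.Set.contains wanted q.2 then
        d.modify q.2 dflt (fun s => (min s.1 p.1, max s.2.1 p.1, min s.2.2.1 q.1, max s.2.2.2 q.1))
      else d) d) d0
  dfin.items.map (fun p => (p.1, [p.2.1, p.2.2.1, p.2.2.2.1, p.2.2.2.2]))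

-- ===== PRECONDITION & SPEC =====
-- Pre_ excludes exactly the inputs where A raises IndexError: colors nonempty with matrix = [] (matrix[0] fails).
def Pre_bar_boundaries (matrix : List (List Int)) (colors : List Int) : Prop :=
  colors = [] ∨ matrix ≠ []
instance (matrix : List (List Int)) (colors : List Int) : Decidable (Pre_bar_boundaries matrix colors) := by unfold Pre_bar_boundaries; infer_instance

def pvWitness_bar_boundaries : List (List Int) × List Int := ([[1, 2], [3, 1]], [1, 3])

def Spec_bar_boundaries (matrix : List (List Int)) (colors : List Int) (out : List (Int × List Int)) : Prop := out = bar_boundaries_alt matrix colors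
instance (matrix : List (List Int)) (colors : List Int) (out : List (Int × List Int)) : Decidable (Spec_bar_boundaries matrix colors out) := by unfold Spec_bar_boundaries; infer_instance

-- ===== CLAIM (what is proved, stated in full; the proofs are below) =====
def Claim_equal_bar_boundaries : Prop := ∀ (matrix : List (List Int)) (colors : List Int), Dom_bar_boundaries matrix colors → Pre_bar_boundaries matrix colors → Spec_bar_boundaries matrix colors (bar_boundaries matrix colors)

-- ===== LEMMAS AND PROOFS =====

-- The per-cell update of a box.
def pvUpd (i j : Int) (s : Int × Int × Int × Int) : Int × Int × Int × Int :=
  (min s.1 i, max s.2.1 i, min s.2.2.1 j, max s.2.2.2 j)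

-- The flattened list of (row index, column index, cell) triples.
def pvCells (matrix : List (List Int)) : List (Int × Int × Int) :=
  (PySem.List.enumerate matrix 0).flatMap
    (fun p => (PySem.List.enumerate p.2 0).map (fun q => (p.1, q.1, q.2)))

-- A's per-color state fold over the flattened cells.
def pvStepA (c : Int) (s : Int × Int × Int × Int) (t : Int × Int × Int) :
    Int × Int × Int × Int :=
  if t.2.2 == c then pvUpd t.1 t.2.1 s else s

lemma pvScanColor_eq_cells (matrix : List (List Int)) (c : Int) :
    pvScanColor matrix c = (pvCells matrix).foldl (pvStepA c)
      ((matrix.length : Int), 0, (((PySem.List.pyGet? matrix 0).getD []).length : Int), 0) := by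
  unfold pvScanColor pvCells
  rw [List.foldl_flatMap]
  congr 1
  funext s p
  rw [List.foldl_map]
  simp [pvStepA, pvUpd]

-- B's matrix fold over the flattened cells.
lemma pvAltFold_eq_cells (matrix : List (List Int)) (wanted : PySem.Set Int)
    (dflt : Int × Int × Int × Int) (d0 : PySem.Dict Int (Int × Int × Int × Int)) :
    (PySem.List.enumerate matrix 0).foldl (fun d p =>
      (PySem.List.enumerate p.2 0).foldl (fun d q =>
        if PySem.Set.contains wanted q.2 then
          d.modify q.2 dflt (fun s => (min s.1 p.1, max s.2.1 p.1, min s.2.2.1 q.1, max s.2.2.2 q.1))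
        else d) d) d0
    = (pvCells matrix).foldl (fun d t =>
        if PySem.Set.contains wanted t.2.2 then
          d.modify t.2.2 dflt (fun s => pvUpd t.1 t.2.1 s)
        else d) d0 := by
  unfold pvCells
  rw [List.foldl_flatMap]
  congr 1
  funext d p
  rw [List.foldl_map]
  simp [pvUpd]

-- A fold that inserts f c at every c yields the dedup'd key list mapped through f.
lemma pvFoldInsert (f : Int → Int × Int × Int × Int) :
    ∀ (cs : List Int) (L : List Int), L.Nodup →
    cs.foldl (fun d c => d.insert c (f c))
        (PySem.Dict.mk (L.map (fun c => (c, f c))))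
      = PySem.Dict.mk ((PySem.Set.update L cs).map (fun c => (c, f c))) := by
  intro cs
  induction cs with
  | nil => intro L _; simp [PySem.Set.update]
  | cons c cs ih =>
    intro L hL
    have hcont : (PySem.Dict.mk (L.map (fun x => (x, f x)))).contains c
        = decide (c ∈ L) := by
      rw [PySem.Dict.contains_eq_decide_mem_keys]
      simp [PySem.Dict.keys]
    by_cases hc : c ∈ L
    · have h1 : (PySem.Dict.mk (L.map (fun x => (x, f x)))).insert c (f c)
          = PySem.Dict.mk (L.map (fun x => (x, f x))) := by
        apply PySem.Dict.ext
        rw [PySem.Dict.items_insert_of_contains _ _ (by rw [hcont]; simpa)]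
        show (L.map (fun x => (x, f x))).map _ = L.map (fun x => (x, f x))
        rw [List.map_map]
        refine List.map_congr_left (fun x _ => ?_)
        by_cases hx : x = c <;> simp [hx]
      have hadd : PySem.Set.add L c = L := by simp [PySem.Set.add, hc]
      simp only [List.foldl_cons, h1, PySem.Set.update, List.foldl_cons, hadd]
      exact ih L hL
    · have h1 : (PySem.Dict.mk (L.map (fun x => (x, f x)))).insert c (f c)
          = PySem.Dict.mk ((L ++ [c]).map (fun x => (x, f x))) := by
        apply PySem.Dict.ext
        rw [PySem.Dict.items_insert_of_not_contains _ _ (by rw [hcont]; simpa)]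
        simp
      have hadd : PySem.Set.add L c = L ++ [c] := by simp [PySem.Set.add, hc]
      simp only [List.foldl_cons, h1, PySem.Set.update, List.foldl_cons, hadd]
      exact ih (L ++ [c]) (hL.append (List.nodup_singleton c)
        (fun a ha hb => by rw [List.mem_singleton] at hb; exact hc (hb ▸ ha)))

-- Core invariant: B's single pass over the cells, on a dict whose keys are exactly the
-- wanted set L, performs A's per-color fold independently at every key.
lemma pvCellsFold (L : List Int) (hL : L.Nodup) (dflt : Int × Int × Int × Int) :
    ∀ (cells : List (Int × Int × Int)) (v : Int → Int × Int × Int × Int),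
    cells.foldl (fun d t =>
        if PySem.Set.contains L t.2.2 then
          d.modify t.2.2 dflt (fun s => pvUpd t.1 t.2.1 s)
        else d) (PySem.Dict.mk (L.map (fun c => (c, v c))))
      = PySem.Dict.mk (L.map (fun c => (c, cells.foldl (pvStepA c) (v c)))) := by
  intro cells
  induction cells with
  | nil => intro v; rfl
  | cons t cells ih =>
    intro v
    have hcontS : PySem.Set.contains L t.2.2 = decide (t.2.2 ∈ L) := by
      simp [PySem.Set.contains]
    by_cases hm : t.2.2 ∈ L
    · have hcont : (PySem.Dict.mk (L.map (fun x => (x, v x)))).contains t.2.2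
          = true := by
        rw [PySem.Dict.contains_eq_decide_mem_keys]
        simp [PySem.Dict.keys, hm]
      have hget : (PySem.Dict.mk (L.map (fun x => (x, v x)))).getD t.2.2 dflt
          = v t.2.2 := by
        apply PySem.Dict.getD_of_mem_items
        · exact List.mem_map_of_mem hm
        · simpa [PySem.Dict.keys, List.map_map, Function.comp_def] using hL
      have hmod : (PySem.Dict.mk (L.map (fun x => (x, v x)))).modify t.2.2 dflt
            (pvUpd t.1 t.2.1)
          = PySem.Dict.mk (L.map (fun c =>
              (c, if c = t.2.2 then pvUpd t.1 t.2.1 (v c) else v c))) := by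
        show (PySem.Dict.mk (L.map (fun x => (x, v x)))).insert t.2.2 _ = _
        apply PySem.Dict.ext
        rw [PySem.Dict.items_insert_of_contains _ _ hcont, hget]
        show (L.map (fun x => (x, v x))).map _ = _
        rw [List.map_map]
        refine List.map_congr_left (fun x _ => ?_)
        by_cases hx : x = t.2.2 <;> simp [hx]
      simp only [List.foldl_cons, hcontS, hm, decide_true, if_true, hmod]
      rw [ih]
      congr 1
      refine List.map_congr_left (fun c _ => ?_)
      have hinit : (if c = t.2.2 then pvUpd t.1 t.2.1 (v c) else v c)
          = pvStepA c (v c) t := by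
        by_cases h : c = t.2.2
        · simp [pvStepA, h]
        · rw [if_neg h]; simp [pvStepA, Ne.symm h]
      rw [hinit]
    · simp only [List.foldl_cons, hcontS, hm, decide_false, Bool.false_eq_true, if_false]
      rw [ih]
      congr 1
      refine List.map_congr_left (fun c hcL => ?_)
      have ht : t.2.2 ≠ c := fun h => hm (h ▸ hcL)
      have hinit : pvStepA c (v c) t = v c := by simp [pvStepA, ht]
      rw [hinit]

-- ===== VERDICT (by name: the statement is the Claim_ definition above) =====
theorem bar_boundaries_spec : Claim_equal_bar_boundaries := by
  intro matrix colors _ _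
  show bar_boundaries matrix colors = bar_boundaries_alt matrix colors
  by_cases hc : colors = []
  · subst hc; rfl
  · unfold bar_boundaries bar_boundaries_alt
    rw [if_neg (by simpa using hc)]
    show List.map (fun p => (p.1, [p.2.1, p.2.2.1, p.2.2.2.1, p.2.2.2.2]))
        (colors.foldl (fun d color => d.insert color (pvScanColor matrix color))
          (PySem.Dict.empty : PySem.Dict Int (Int × Int × Int × Int))).items
      = List.map (fun p => (p.1, [p.2.1, p.2.2.1, p.2.2.2.1, p.2.2.2.2]))
        ((PySem.List.enumerate matrix 0).foldl (fun d p =>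
          (PySem.List.enumerate p.2 0).foldl (fun d q =>
            if PySem.Set.contains (PySem.Set.ofList colors) q.2 then
              d.modify q.2 ((matrix.length : Int), 0, (((PySem.List.pyGet? matrix 0).getD []).length : Int), 0)
                (fun s => (min s.1 p.1, max s.2.1 p.1, min s.2.2.1 q.1, max s.2.2.2 q.1))
            else d) d)
          (colors.foldl (fun d color => d.insert color ((matrix.length : Int), 0, (((PySem.List.pyGet? matrix 0).getD []).length : Int), 0))
            (PySem.Dict.empty : PySem.Dict Int (Int × Int × Int × Int)))).items
    have hA : colors.foldl (fun d color => d.insert color (pvScanColor matrix color))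
          (PySem.Dict.empty : PySem.Dict Int (Int × Int × Int × Int))
        = PySem.Dict.mk ((PySem.Set.ofList colors).map
            (fun c => (c, pvScanColor matrix c))) :=
      pvFoldInsert (pvScanColor matrix) colors [] List.nodup_nil
    have hB0 := pvFoldInsert
      (fun _ => ((matrix.length : Int), 0, (((PySem.List.pyGet? matrix 0).getD []).length : Int), 0))
      colors [] List.nodup_nil
    have hcf := pvCellsFold (PySem.Set.ofList colors) (PySem.Set.nodup_ofList colors)
      ((matrix.length : Int), 0, (((PySem.List.pyGet? matrix 0).getD []).length : Int), 0)
      (pvCells matrix)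
      (fun _ => ((matrix.length : Int), 0, (((PySem.List.pyGet? matrix 0).getD []).length : Int), 0))
    beta_reduce at hB0 hcf
    simp only [List.map_nil] at hB0
    rw [show PySem.Set.update ([] : List Int) colors = PySem.Set.ofList colors from rfl] at hB0
    rw [hA]
    rw [show (PySem.Dict.empty : PySem.Dict Int (Int × Int × Int × Int)) = PySem.Dict.mk [] from rfl]
    rw [hB0, pvAltFold_eq_cells, hcf]
    congr 1
    refine List.map_congr_left (fun c _ => ?_)
    rw [pvScanColor_eq_cells]
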